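-- pv_equiv track=rewrite | github.com/prince-ao/advent-of-code | 2024/day4.py | count_vertical
-- ===== SOURCE A (Python) =====
-- def count_vertical(i: int, j: int, puzzle: list[list[str]]) -> int:
--     count = 0
--     place = 0
--     left = ['M', 'A', 'S']
--
--     old_i = i
--
--     i += 1
--
--     while i < len(puzzle) and place < len(left):
--         if puzzle[i][j] != left[place]:
--             break
--         place += 1
--         i += 1
--
--     if place == len(left):
--         count += 1
--
--     i = old_i
--     place = 0
--
--     i -= 1
--
--     while i >= 0 and place < len(left):
--         if puzzle[i][j] != left[place]:
--             break
--         place += 1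
--         i -= 1
--
--     if place == len(left):
--         count += 1
--
--     return count
-- ===== SOURCE B (Python) =====
-- def count_vertical(i: int, j: int, puzzle: list[list[str]]) -> int:
--     col = [row[j] for row in puzzle]
--     mas = ['M', 'A', 'S']
--     count = 0
--     if i + 1 >= 0 and col[i + 1:i + 4] == mas:
--         count += 1
--     if i - 3 >= 0 and col[i - 3:i] == mas[::-1]:
--         count += 1
--     return count
-- ===== Notes on version B (the rewrite author's own statement) =====
-- stated objective: alternative
-- what changed: B first projects column j of the whole grid into one list, then counts by comparing the Python slices col[i+1:i+4] and col[i-3:i] against ['M','A','S'] and its reversal, instead of A's two stateful while-loops that step a place counter cell by cell with early break.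
-- intended difference: For i <= -2 whose wrapped window puzzle[i+1],puzzle[i+2],puzzle[i+3] spells M,A,S, A's downward scan wraps to the bottom rows via Python negative indexing and counts a phantom match (returning 1 more), while B counts 0 below the grid, the intended value for an above/below pattern count. — e.g. on count_vertical(-2, 0, [["A"], ["S"], ["M"]]): A returns 1, B returns 0
-- outside the precondition, e.g. on count_vertical(0, 5, [['a']]): A returns 0, B raises IndexError
import Mathlib
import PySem

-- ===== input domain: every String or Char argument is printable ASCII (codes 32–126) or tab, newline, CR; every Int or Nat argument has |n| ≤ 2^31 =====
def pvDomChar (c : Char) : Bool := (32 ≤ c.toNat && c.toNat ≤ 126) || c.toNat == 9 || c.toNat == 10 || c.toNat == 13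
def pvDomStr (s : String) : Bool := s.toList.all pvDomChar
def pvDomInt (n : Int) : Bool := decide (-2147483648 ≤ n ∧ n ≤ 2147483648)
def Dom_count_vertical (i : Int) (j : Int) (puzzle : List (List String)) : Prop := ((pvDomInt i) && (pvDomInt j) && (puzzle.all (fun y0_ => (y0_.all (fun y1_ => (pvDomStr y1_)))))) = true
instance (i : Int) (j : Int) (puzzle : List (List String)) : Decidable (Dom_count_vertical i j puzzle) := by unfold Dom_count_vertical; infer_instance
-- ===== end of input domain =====

-- B projects column j into one list and compares the slices col[i+1:i+4] / col[i-3:i]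
-- against ["M","A","S"] / its reversal, instead of A's two stateful while-loops stepping a
-- place counter with early break; return values only, no mutation.

-- ===== PORT A =====
-- the downward while-loop: while i < len(puzzle) and place < len(left): …
def cvLoopDown (puzzle : List (List String)) (j : Int) (i : Int) (place : Nat) : Nat :=
  if _h : i < (puzzle.length : Int) ∧ place < 3 then
    match (PySem.List.pyGet? puzzle i).bind (fun row => PySem.List.pyGet? row j) with
    | none => place   -- Python raises IndexError here; excluded by Pre_
    | some c => if c ≠ (["M", "A", "S"].getD place "") then place
                else cvLoopDown puzzle j (i + 1) (place + 1)
  else place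
termination_by 3 - place
decreasing_by omega

-- the upward while-loop: while i >= 0 and place < len(left): …
def cvLoopUp (puzzle : List (List String)) (j : Int) (i : Int) (place : Nat) : Nat :=
  if _h : 0 ≤ i ∧ place < 3 then
    match (PySem.List.pyGet? puzzle i).bind (fun row => PySem.List.pyGet? row j) with
    | none => place   -- Python raises IndexError here; excluded by Pre_
    | some c => if c ≠ (["M", "A", "S"].getD place "") then place
                else cvLoopUp puzzle j (i - 1) (place + 1)
  else place
termination_by 3 - place
decreasing_by omega

def count_vertical (i : Int) (j : Int) (puzzle : List (List String)) : Int :=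
  let place1 := cvLoopDown puzzle j (i + 1) 0
  let count1 : Int := if place1 = 3 then 1 else 0
  let place2 := cvLoopUp puzzle j (i - 1) 0
  count1 + (if place2 = 3 then 1 else 0)

-- ===== PORT B =====
def count_vertical_alt (i : Int) (j : Int) (puzzle : List (List String)) : Int :=
  -- col = [row[j] for row in puzzle]; Pre_ guarantees j in range, the getD default is never read
  let col : List String := puzzle.map (fun row => (PySem.List.pyGet? row j).getD "")
  let mas : List String := ["M", "A", "S"]
  let count1 : Int :=
    if 0 ≤ i + 1 ∧ PySem.List.slice col (some (i + 1)) (some (i + 4)) = mas then 1 else 0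
  if 0 ≤ i - 3 ∧ PySem.List.slice col (some (i - 3)) (some i) = mas.reverse
  then count1 + 1 else count1

-- ===== PRECONDITION & SPEC =====
-- Pre_ excludes only inputs where one side raises IndexError: j not a valid (possibly
-- negative, Python-wrap) index into some row -- there A may break early or never read while
-- B's column extraction raises (or A itself raises) -- and i outside the band
-- [-(len+1), len] on which A's own accesses stay in range.
def Pre_count_vertical (i : Int) (j : Int) (puzzle : List (List String)) : Prop :=
  (∀ row ∈ puzzle, PySem.Raise.InRange row.length j) ∧
  -((puzzle.length : Int) + 1) ≤ i ∧ i ≤ (puzzle.length : Int)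
instance (i : Int) (j : Int) (puzzle : List (List String)) : Decidable (Pre_count_vertical i j puzzle) := by unfold Pre_count_vertical; infer_instance

def pvWitness_count_vertical : Int × Int × List (List String) :=
  (0, 0, [["X"], ["M"], ["A"], ["S"]])

-- For i <= -2 whose wrapped window puzzle[i+1..i+3] spells M,A,S, A's downward scan wraps to
-- the bottom rows via negative indexing and counts a phantom match (one more), while B counts
-- 0 below the grid, the intended value for an above/below pattern count.
def D_count_vertical (i : Int) (j : Int) (puzzle : List (List String)) : Prop :=
  i ≤ -2 ∧ (PySem.List.slice (puzzle ++ puzzle) (some (i + 1 + puzzle.length))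
    (some (i + 4 + puzzle.length))).map (PySem.List.pyGet? · j) = [some "M", some "A", some "S"]
instance (i : Int) (j : Int) (puzzle : List (List String)) : Decidable (D_count_vertical i j puzzle) := by unfold D_count_vertical; infer_instance

def Spec_count_vertical (i : Int) (j : Int) (puzzle : List (List String)) (out : Int) : Prop := ¬ D_count_vertical i j puzzle → out = count_vertical_alt i j puzzle
instance (i : Int) (j : Int) (puzzle : List (List String)) (out : Int) : Decidable (Spec_count_vertical i j puzzle out) := by unfold Spec_count_vertical; infer_instance

def pvDiffWitness_count_vertical : Int × Int × List (List String) :=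
  (-2, 0, [["A"], ["S"], ["M"]])
def pvDiffWitnessOut_count_vertical : Int × Int := (1, 0)

-- ===== CLAIM (what is proved, stated in full; the proofs are below) =====
def Claim_unchanged_count_vertical : Prop := ∀ (i : Int) (j : Int) (puzzle : List (List String)), Dom_count_vertical i j puzzle → Pre_count_vertical i j puzzle → Spec_count_vertical i j puzzle (count_vertical i j puzzle)
def Claim_changed_count_vertical : Prop := Dom_count_vertical (pvDiffWitness_count_vertical.1) (pvDiffWitness_count_vertical.2.1) (pvDiffWitness_count_vertical.2.2) ∧ Pre_count_vertical (pvDiffWitness_count_vertical.1) (pvDiffWitness_count_vertical.2.1) (pvDiffWitness_count_vertical.2.2) ∧ D_count_vertical (pvDiffWitness_count_vertical.1) (pvDiffWitness_count_vertical.2.1) (pvDiffWitness_count_vertical.2.2) ∧ count_vertical (pvDiffWitness_count_vertical.1) (pvDiffWitness_count_vertical.2.1) (pvDiffWitness_count_vertical.2.2) = pvDiffWitnessOut_count_vertical.1 ∧ count_vertical_alt (pvDiffWitness_count_vertical.1) (pvDiffWitness_count_vertical.2.1) (pvDiffWitness_count_vertical.2.2) = pvDiffWitnessOut_count_vertical.2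 ∧ pvDiffWitnessOut_count_vertical.1 ≠ pvDiffWitnessOut_count_vertical.2
def Claim_exact_count_vertical : Prop := ∀ (i : Int) (j : Int) (puzzle : List (List String)), Dom_count_vertical i j puzzle → Pre_count_vertical i j puzzle → D_count_vertical i j puzzle → count_vertical i j puzzle ≠ count_vertical_alt i j puzzle

-- ===== LEMMAS AND PROOFS =====

-- the cell lookup, wrap-aware like Python's puzzle[i][j] (proof-side abbreviation)
def pvCell (puzzle : List (List String)) (j k : Int) : Option String :=
  (PySem.List.pyGet? puzzle k).bind (fun row => PySem.List.pyGet? row j)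

-- a cell lookup that succeeds is in range
lemma pvCell_inrange {puzzle : List (List String)} {j k : Int} {c : String}
    (h : pvCell puzzle j k = some c) :
    -(puzzle.length : Int) ≤ k ∧ k < (puzzle.length : Int) := by
  unfold pvCell at h
  cases hg : PySem.List.pyGet? puzzle k with
  | none => rw [hg] at h; simp at h
  | some row =>
    by_contra hn
    have hnone : PySem.List.pyGet? puzzle k = none := by
      rw [PySem.List.pyGet?_eq_none_iff]
      intro hin
      exact hn hin
    rw [hnone] at hg; cases hg

-- take 3 of a list equals a 3-list iff the first three lookups do
lemma take3_eq_iff {α : Type} (m : List α) (x y z : α) :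
    m.take 3 = [x, y, z] ↔ m[0]? = some x ∧ m[1]? = some y ∧ m[2]? = some z := by
  match m with
  | [] => simp
  | [a] => simp
  | [a, b] => simp
  | a :: b :: c :: rest => simp [List.take]


lemma pyGet?_doubled {α : Type} (p : List α) (k : Int)
    (h1 : -(p.length : Int) ≤ k) (h2 : k < (p.length : Int)) :
    PySem.List.pyGet? p k = (p ++ p)[((p.length : Int) + k).toNat]? := by
  by_cases h : 0 ≤ k
  · rw [PySem.List.pyGet?_of_nonneg p h, List.getElem?_append_right (by omega)]
    congr 1
    omega
  · have hm : k = -(((-k).toNat : Nat) : Int) := by omega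
    rw [hm, PySem.List.pyGet?_neg_natCast _ _ (by omega) (by omega), ← hm]
    rw [List.getElem?_append_left (by omega)]
    congr 1
    omega

lemma Dslice_iff (i j : Int) (p : List (List String))
    (hlo : -((p.length : Int) + 1) ≤ i) (_hi : i ≤ -2) :
    (PySem.List.slice (p ++ p) (some (i + 1 + p.length))
      (some (i + 4 + p.length))).map (fun row => PySem.List.pyGet? row j) =
      [some "M", some "A", some "S"] ↔
    (pvCell p j (i + 1) = some "M" ∧ pvCell p j (i + 2) = some "A" ∧
     pvCell p j (i + 3) = some "S") := by
  have ha : 0 ≤ i + 1 + (p.length : Int) := by omega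
  rw [PySem.List.slice_toNat _ ha (by omega),
      show (i + 4 + (p.length : Int)).toNat - (i + 1 + (p.length : Int)).toNat = 3 from by omega,
      List.map_take, List.map_drop, take3_eq_iff,
      List.getElem?_drop, List.getElem?_drop, List.getElem?_drop,
      List.getElem?_map, List.getElem?_map, List.getElem?_map]
  have key : ∀ (t : Nat) (v : String), t < 3 →
      ((((p ++ p)[(i + 1 + (p.length : Int)).toNat + t]?).map
          (fun row => PySem.List.pyGet? row j) = some (some v)) ↔
        pvCell p j (i + 1 + t) = some v) := by
    intro t v ht
    by_cases hn2 : i + 1 + (t : Int) < (p.length : Int)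
    · rw [show (i + 1 + (p.length : Int)).toNat + t = ((p.length : Int) + (i + 1 + t)).toNat from by omega]
      rw [← pyGet?_doubled p (i + 1 + t) (by omega) hn2]
      unfold pvCell
      cases hg : PySem.List.pyGet? p (i + 1 + t) <;> simp
    · have hidx : (p ++ p).length ≤ (i + 1 + (p.length : Int)).toNat + t := by
        rw [List.length_append]; omega
      rw [List.getElem?_eq_none hidx]
      unfold pvCell
      have hnone : PySem.List.pyGet? p (i + 1 + t) = none := by
        rw [PySem.List.pyGet?_eq_none_iff]
        intro hin
        exact absurd hin.2 (by omega)
      rw [hnone]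
      simp
  rw [key 0 "M" (by omega), key 1 "A" (by omega), key 2 "S" (by omega)]
  rw [show i + 1 + ((0 : Nat) : Int) = i + 1 from by simp,
      show i + 1 + ((1 : Nat) : Int) = i + 2 from by push_cast; ring,
      show i + 1 + ((2 : Nat) : Int) = i + 3 from by push_cast; ring]

lemma D_iff (i j : Int) (puzzle : List (List String))
    (hlo : -((puzzle.length : Int) + 1) ≤ i) :
    D_count_vertical i j puzzle ↔
      (i ≤ -2 ∧ pvCell puzzle j (i + 1) = some "M" ∧
       pvCell puzzle j (i + 2) = some "A" ∧ pvCell puzzle j (i + 3) = some "S") := by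
  unfold D_count_vertical
  exact and_congr_right fun hi => Dslice_iff i j puzzle hlo hi

lemma cvLoopDown_eq_three_iff (puzzle : List (List String)) (j : Int)
    (H : ∀ k : Int, -(puzzle.length : Int) ≤ k → k < (puzzle.length : Int) → ∃ c, pvCell puzzle j k = some c)
    (s : Int) (hs : -(puzzle.length : Int) ≤ s) :
    cvLoopDown puzzle j s 0 = 3 ↔
      s + 2 < (puzzle.length : Int) ∧ pvCell puzzle j s = some "M" ∧
      pvCell puzzle j (s + 1) = some "A" ∧ pvCell puzzle j (s + 2) = some "S" := by
  simp only [pvCell]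
  rw [cvLoopDown]
  by_cases h0 : s < (puzzle.length : Int)
  · obtain ⟨c0, hc0⟩ := H s hs h0
    simp only [pvCell] at hc0
    rw [dif_pos ⟨h0, by omega⟩, hc0]
    show (if c0 ≠ "M" then (0 : Nat) else cvLoopDown puzzle j (s + 1) 1) = 3 ↔ _
    by_cases hM : c0 = "M"
    · rw [if_neg (by simp [hM])]
      rw [cvLoopDown]
      by_cases h1 : s + 1 < (puzzle.length : Int)
      · obtain ⟨c1, hc1⟩ := H (s + 1) (by omega) h1
        simp only [pvCell] at hc1
        rw [dif_pos ⟨h1, by omega⟩, hc1]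
        show (if c1 ≠ "A" then (1 : Nat) else cvLoopDown puzzle j (s + 1 + 1) 2) = 3 ↔ _
        by_cases hA : c1 = "A"
        · rw [if_neg (by simp [hA])]
          rw [cvLoopDown]
          have e2 : s + 1 + 1 = s + 2 := by ring
          by_cases h2 : s + 1 + 1 < (puzzle.length : Int)
          · obtain ⟨c2, hc2⟩ := H (s + 1 + 1) (by omega) h2
            simp only [pvCell] at hc2
            rw [dif_pos ⟨h2, by omega⟩, hc2]
            show (if c2 ≠ "S" then (2 : Nat) else cvLoopDown puzzle j (s + 1 + 1 + 1) 3) = 3 ↔ _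
            rw [e2] at hc2 h2
            rw [hc2]
            by_cases hS : c2 = "S"
            · rw [if_neg (by simp [hS])]
              rw [cvLoopDown, dif_neg (by omega)]
              constructor
              · intro _
                exact ⟨by omega, by rw [hM], by rw [hA], by rw [hS]⟩
              · intro _; rfl
            · rw [if_pos (by simp [hS])]
              constructor
              · intro h; exact absurd h (by decide)
              · rintro ⟨-, -, -, h4⟩
                exact absurd (Option.some.inj h4) hS
          · rw [dif_neg (by omega)]
            constructor
            · intro h; exact absurd h (by decide)
            · rintro ⟨hb, -⟩; omega
        · rw [if_pos (by simp [hA])]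
          constructor
          · intro h; exact absurd h (by decide)
          · rintro ⟨-, -, h3, -⟩
            exact absurd (Option.some.inj h3) hA
      · rw [dif_neg (by omega)]
        constructor
        · intro h; exact absurd h (by decide)
        · rintro ⟨hb, -⟩; omega
    · rw [if_pos (by simp [hM])]
      constructor
      · intro h; exact absurd h (by decide)
      · rintro ⟨-, h2, -⟩
        exact absurd (Option.some.inj h2) hM
  · rw [dif_neg (by omega)]
    constructor
    · intro h; exact absurd h (by decide)
    · rintro ⟨hb, -⟩; omega

lemma cvLoopUp_eq_three_iff (puzzle : List (List String)) (j : Int)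
    (H : ∀ k : Int, -(puzzle.length : Int) ≤ k → k < (puzzle.length : Int) → ∃ c, pvCell puzzle j k = some c)
    (s : Int) (hslen : s < (puzzle.length : Int)) :
    cvLoopUp puzzle j s 0 = 3 ↔
      0 ≤ s - 2 ∧ pvCell puzzle j s = some "M" ∧
      pvCell puzzle j (s - 1) = some "A" ∧ pvCell puzzle j (s - 2) = some "S" := by
  simp only [pvCell]
  rw [cvLoopUp]
  by_cases h0 : 0 ≤ s
  · obtain ⟨c0, hc0⟩ := H s (by omega) hslen
    simp only [pvCell] at hc0
    rw [dif_pos ⟨h0, by omega⟩, hc0]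
    show (if c0 ≠ "M" then (0 : Nat) else cvLoopUp puzzle j (s - 1) 1) = 3 ↔ _
    by_cases hM : c0 = "M"
    · rw [if_neg (by simp [hM])]
      rw [cvLoopUp]
      by_cases h1 : 0 ≤ s - 1
      · obtain ⟨c1, hc1⟩ := H (s - 1) (by omega) (by omega)
        simp only [pvCell] at hc1
        rw [dif_pos ⟨h1, by omega⟩, hc1]
        show (if c1 ≠ "A" then (1 : Nat) else cvLoopUp puzzle j (s - 1 - 1) 2) = 3 ↔ _
        by_cases hA : c1 = "A"
        · rw [if_neg (by simp [hA])]
          rw [cvLoopUp]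
          have e2 : s - 1 - 1 = s - 2 := by ring
          by_cases h2 : 0 ≤ s - 1 - 1
          · obtain ⟨c2, hc2⟩ := H (s - 1 - 1) (by omega) (by omega)
            simp only [pvCell] at hc2
            rw [dif_pos ⟨h2, by omega⟩, hc2]
            show (if c2 ≠ "S" then (2 : Nat) else cvLoopUp puzzle j (s - 1 - 1 - 1) 3) = 3 ↔ _
            rw [e2] at hc2 h2
            rw [hc2]
            by_cases hS : c2 = "S"
            · rw [if_neg (by simp [hS])]
              rw [cvLoopUp, dif_neg (by omega)]
              constructor
              · intro _
                exact ⟨by omega, by rw [hM], by rw [hA], by rw [hS]⟩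
              · intro _; rfl
            · rw [if_pos (by simp [hS])]
              constructor
              · intro h; exact absurd h (by decide)
              · rintro ⟨-, -, -, h4⟩
                exact absurd (Option.some.inj h4) hS
          · rw [dif_neg (by omega)]
            constructor
            · intro h; exact absurd h (by decide)
            · rintro ⟨hb, -⟩; omega
        · rw [if_pos (by simp [hA])]
          constructor
          · intro h; exact absurd h (by decide)
          · rintro ⟨-, -, h3, -⟩
            exact absurd (Option.some.inj h3) hA
      · rw [dif_neg (by omega)]
        constructor
        · intro h; exact absurd h (by decide)
        · rintro ⟨hb, -⟩; omega
    · rw [if_pos (by simp [hM])]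
      constructor
      · intro h; exact absurd h (by decide)
      · rintro ⟨-, h2, -⟩
        exact absurd (Option.some.inj h2) hM
  · rw [dif_neg (by omega)]
    constructor
    · intro h; exact absurd h (by decide)
    · rintro ⟨hb, -⟩; omega

-- under Pre_'s j-validity, the column lookup equals pvCell at nonnegative indices
lemma col_get_eq_pvCell (puzzle : List (List String)) (j : Int)
    (hrow : ∀ row ∈ puzzle, PySem.Raise.InRange row.length j) (k : Nat) :
    (puzzle.map (fun row => (PySem.List.pyGet? row j).getD ""))[k]? = pvCell puzzle j (k : Int) := by
  unfold pvCell
  rw [PySem.List.pyGet?_natCast, List.getElem?_map]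
  cases h : puzzle[k]? with
  | none => simp
  | some row =>
    have hmem : row ∈ puzzle := List.mem_of_getElem? h
    cases hg : PySem.List.pyGet? row j with
    | none =>
      rw [PySem.List.pyGet?_eq_none_iff] at hg
      exact absurd (hrow row hmem) hg
    | some c => simp [hg]

-- B's downward slice condition, phrased through pvCell (0 ≤ a)
lemma slice3_eq_iff (puzzle : List (List String)) (j : Int)
    (hrow : ∀ row ∈ puzzle, PySem.Raise.InRange row.length j)
    (a : Int) (ha : 0 ≤ a) (x y z : String) :
    PySem.List.slice (puzzle.map (fun row => (PySem.List.pyGet? row j).getD "")) (some a) (some (a + 3)) = [x, y, z] ↔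
      pvCell puzzle j a = some x ∧ pvCell puzzle j (a + 1) = some y ∧ pvCell puzzle j (a + 2) = some z := by
  rw [PySem.List.slice_toNat _ ha (by omega)]
  have h3 : (a + 3).toNat - a.toNat = 3 := by omega
  rw [h3, take3_eq_iff]
  rw [List.getElem?_drop, List.getElem?_drop, List.getElem?_drop]
  rw [col_get_eq_pvCell puzzle j hrow, col_get_eq_pvCell puzzle j hrow,
      col_get_eq_pvCell puzzle j hrow]
  rw [show ((a.toNat + 0 : Nat) : Int) = a from by omega,
      show ((a.toNat + 1 : Nat) : Int) = a + 1 from by omega,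
      show ((a.toNat + 2 : Nat) : Int) = a + 2 from by omega]

-- ===== VERDICT (by name: the statement is the Claim_ definition above) =====
theorem count_vertical_spec : Claim_unchanged_count_vertical := by
  intro i j puzzle _ hpre hnd
  obtain ⟨hrow, hlo, hhi⟩ := hpre
  have H : ∀ k : Int, -(puzzle.length : Int) ≤ k → k < (puzzle.length : Int) →
      ∃ c, pvCell puzzle j k = some c := by
    intro k hk0 hklen
    cases hg : PySem.List.pyGet? puzzle k with
    | none =>
      rw [PySem.List.pyGet?_eq_none_iff] at hg
      exact absurd ⟨hk0, hklen⟩ hg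
    | some row =>
      have hj := hrow row (PySem.List.mem_of_pyGet?_eq_some _ hg)
      cases hg2 : PySem.List.pyGet? row j with
      | none =>
        rw [PySem.List.pyGet?_eq_none_iff] at hg2
        exact absurd hj hg2
      | some c => exact ⟨c, by simp [pvCell, hg, hg2]⟩
  have hd := cvLoopDown_eq_three_iff puzzle j H (i + 1) (by omega)
  rw [show i + 1 + 1 = i + 2 from by ring, show i + 1 + 2 = i + 3 from by ring] at hd
  have hBform : count_vertical_alt i j puzzle =
      (if 0 ≤ i + 1 ∧ PySem.List.slice (puzzle.map (fun row => (PySem.List.pyGet? row j).getD "")) (some (i + 1)) (some (i + 4)) = ["M", "A", "S"] then (1 : Int) else 0) +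
      (if 0 ≤ i - 3 ∧ PySem.List.slice (puzzle.map (fun row => (PySem.List.pyGet? row j).getD "")) (some (i - 3)) (some i) = ["S", "A", "M"] then (1 : Int) else 0) := by
    show (if 0 ≤ i - 3 ∧ _ = List.reverse ["M", "A", "S"] then _ + 1 else _) = _
    rw [show List.reverse ["M", "A", "S"] = ["S", "A", "M"] from rfl]
    split_ifs <;> ring
  show (if cvLoopDown puzzle j (i + 1) 0 = 3 then (1 : Int) else 0) +
       (if cvLoopUp puzzle j (i - 1) 0 = 3 then (1 : Int) else 0) = _
  rw [hBform]
  by_cases hi : -1 ≤ i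
  · -- down halves agree
    have hdown : (cvLoopDown puzzle j (i + 1) 0 = 3) ↔
        (0 ≤ i + 1 ∧ PySem.List.slice (puzzle.map (fun row => (PySem.List.pyGet? row j).getD "")) (some (i + 1)) (some (i + 4)) = ["M", "A", "S"]) := by
      rw [hd, show i + 4 = (i + 1) + 3 from by ring,
          slice3_eq_iff puzzle j hrow (i + 1) (by omega),
          show i + 1 + 1 = i + 2 from by ring, show i + 1 + 2 = i + 3 from by ring]
      constructor
      · rintro ⟨hlt, h1, h2, h3⟩; exact ⟨by omega, h1, h2, h3⟩
      · rintro ⟨-, h1, h2, h3⟩; exact ⟨(pvCell_inrange h3).2, h1, h2, h3⟩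
    have hu := cvLoopUp_eq_three_iff puzzle j H (i - 1) (by omega)
    rw [show i - 1 - 1 = i - 2 from by ring, show i - 1 - 2 = i - 3 from by ring] at hu
    have hup : (cvLoopUp puzzle j (i - 1) 0 = 3) ↔
        (0 ≤ i - 3 ∧ PySem.List.slice (puzzle.map (fun row => (PySem.List.pyGet? row j).getD "")) (some (i - 3)) (some i) = ["S", "A", "M"]) := by
      by_cases h3i : 0 ≤ i - 3
      · have hsl := slice3_eq_iff puzzle j hrow (i - 3) h3i "S" "A" "M"
        rw [show (i - 3) + 3 = i from by ring, show (i - 3) + 1 = i - 2 from by ring,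
            show (i - 3) + 2 = i - 1 from by ring] at hsl
        rw [hu]
        constructor
        · rintro ⟨-, hM, hA, hS⟩; exact ⟨h3i, hsl.mpr ⟨hS, hA, hM⟩⟩
        · rintro ⟨-, hs⟩
          obtain ⟨hS, hA, hM⟩ := hsl.mp hs
          exact ⟨h3i, hM, hA, hS⟩
      · rw [hu]
        constructor
        · rintro ⟨hb, -⟩; omega
        · rintro ⟨hb, -⟩; omega
    rw [if_congr hdown rfl rfl, if_congr hup rfl rfl]
  · -- i ≤ -2: A's down loop can only reach 3 on the D_ window, excluded by ¬D_
    have hAdown : cvLoopDown puzzle j (i + 1) 0 ≠ 3 := by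
      intro h
      obtain ⟨-, h1, h2, h3⟩ := hd.mp h
      exact hnd ((D_iff i j puzzle (by omega)).mpr ⟨by omega, h1, h2, h3⟩)
    have hAup : cvLoopUp puzzle j (i - 1) 0 = 0 := by
      rw [cvLoopUp, dif_neg (by omega)]
    rw [if_neg hAdown, hAup]
    have c1 : ¬ (0 ≤ i + 1) := by omega
    have c2 : ¬ (0 ≤ i - 3) := by omega
    norm_num [c1, c2]
    intro h
    exact absurd h (by omega)

theorem count_vertical_changed : Claim_changed_count_vertical := by
  unfold Claim_changed_count_vertical
  refine ⟨by decide, by decide, by decide, ?_, by decide, by decide⟩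
  show count_vertical (-2) 0 [["A"], ["S"], ["M"]] = 1
  have hdw : cvLoopDown [["A"], ["S"], ["M"]] 0 (-2 + 1) 0 = 3 := by
    rw [cvLoopDown]; norm_num [PySem.List.pyGet?, PySem.List.pyIdx?]
    rw [cvLoopDown]; norm_num [PySem.List.pyGet?, PySem.List.pyIdx?]
    rw [cvLoopDown]; norm_num [PySem.List.pyGet?, PySem.List.pyIdx?]
    rw [cvLoopDown]; norm_num
  have huw : cvLoopUp [["A"], ["S"], ["M"]] 0 (-2 - 1) 0 = 0 := by
    rw [cvLoopUp, dif_neg (by omega)]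
  show (if cvLoopDown [["A"], ["S"], ["M"]] 0 (-2 + 1) 0 = 3 then (1 : Int) else 0) +
       (if cvLoopUp [["A"], ["S"], ["M"]] 0 (-2 - 1) 0 = 3 then (1 : Int) else 0) = 1
  rw [hdw, huw]
  norm_num

theorem count_vertical_tight : Claim_exact_count_vertical := by
  intro i j puzzle _ hpre hD
  obtain ⟨hrow, hlo, hhi⟩ := hpre
  obtain ⟨hi2, h1, h2, h3⟩ := (D_iff i j puzzle (by omega)).mp hD
  have H : ∀ k : Int, -(puzzle.length : Int) ≤ k → k < (puzzle.length : Int) →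
      ∃ c, pvCell puzzle j k = some c := by
    intro k hk0 hklen
    cases hg : PySem.List.pyGet? puzzle k with
    | none =>
      rw [PySem.List.pyGet?_eq_none_iff] at hg
      exact absurd ⟨hk0, hklen⟩ hg
    | some row =>
      have hj := hrow row (PySem.List.mem_of_pyGet?_eq_some _ hg)
      cases hg2 : PySem.List.pyGet? row j with
      | none =>
        rw [PySem.List.pyGet?_eq_none_iff] at hg2
        exact absurd hj hg2
      | some c => exact ⟨c, by simp [pvCell, hg, hg2]⟩
  have hd := cvLoopDown_eq_three_iff puzzle j H (i + 1) (by omega)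
  rw [show i + 1 + 1 = i + 2 from by ring, show i + 1 + 2 = i + 3 from by ring] at hd
  have hA : count_vertical i j puzzle = 1 := by
    show (if cvLoopDown puzzle j (i + 1) 0 = 3 then (1 : Int) else 0) +
         (if cvLoopUp puzzle j (i - 1) 0 = 3 then (1 : Int) else 0) = 1
    rw [if_pos (hd.mpr ⟨(pvCell_inrange h3).2, h1, h2, h3⟩),
        show cvLoopUp puzzle j (i - 1) 0 = 0 from by rw [cvLoopUp, dif_neg (by omega)]]
    norm_num
  have hB : count_vertical_alt i j puzzle = 0 := by
    show (if 0 ≤ i - 3 ∧ _ then _ + 1 else _) = (0 : Int)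
    rw [if_neg (by rintro ⟨hb, -⟩; omega), if_neg (by rintro ⟨hb, -⟩; omega)]
  rw [hA, hB]
  norm_num
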